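-- pv_equiv track=rewrite | github.com/NesoDev/athena-casino-ea | src/functions/lightning_roulette/auxiliary_functions.py | is_equal_zones
-- ===== SOURCE A (Python) =====
-- def obtain_zone(number: int) -> int:
--     if number == 0:
--         return 0
--     elif 1 <= number <= 12:
--         return 1
--     elif 13 <= number <= 24:
--         return 2
--     else:
--         return 3
--
-- def is_equal_zones(numbers: list) -> bool:
--     if not numbers:
--         return False
--     zone = obtain_zone(numbers[0])
--     for number in numbers[1:]:
--         if obtain_zone(number) != zone:
--             return False
--     return True
-- ===== SOURCE B (Python) =====
-- def obtain_zone(number: int) -> int: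
--     if number == 0:
--         return 0
--     elif 1 <= number <= 12:
--         return 1
--     elif 13 <= number <= 24:
--         return 2
--     else:
--         return 3
--
-- def is_equal_zones(numbers: list) -> bool:
--     mask = 0
--     for n in numbers:
--         mask |= 1 << obtain_zone(n)
--     return mask in (1, 2, 4, 8)
-- ===== Notes on version B (the rewrite author's own statement) =====
-- stated objective: alternative
-- what changed: Replaces the reference-zone comparison loop (compare every later zone to the first element's zone, early exit) by a 4-bit occupancy bitmask: OR 1<<zone over all numbers, then test that the mask is a single power of two (1, 2, 4 or 8), so the empty list gives mask 0 and False without a special branch.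
import Mathlib
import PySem

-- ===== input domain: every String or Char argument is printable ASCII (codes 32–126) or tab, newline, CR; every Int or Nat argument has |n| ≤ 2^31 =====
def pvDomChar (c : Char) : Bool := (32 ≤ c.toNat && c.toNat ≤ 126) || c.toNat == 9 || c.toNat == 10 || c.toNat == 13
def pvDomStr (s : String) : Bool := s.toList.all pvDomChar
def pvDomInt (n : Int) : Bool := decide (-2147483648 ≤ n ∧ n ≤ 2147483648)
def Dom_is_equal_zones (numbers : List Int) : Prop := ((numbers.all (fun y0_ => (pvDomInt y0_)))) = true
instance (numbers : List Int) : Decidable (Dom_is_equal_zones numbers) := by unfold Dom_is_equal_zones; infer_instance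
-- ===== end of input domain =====

-- B replaces A's reference-zone comparison loop by a 4-bit occupancy bitmask (OR of 1 << zone over all
-- numbers, then test the mask is a single power of two) — an alternative algorithm, same O(n) cost.

-- ===== PORT A =====
def obtain_zone (number : Int) : Int :=
  if number = 0 then 0
  else if 1 ≤ number ∧ number ≤ 12 then 1
  else if 13 ≤ number ∧ number ≤ 24 then 2
  else 3

def is_equal_zones (numbers : List Int) : Bool :=
  match numbers with
  | [] => false
  | first :: rest =>
    let zone := obtain_zone first
    rest.all (fun number => obtain_zone number == zone)

-- ===== PORT B =====
-- mask is a nonnegative Python int (obtain_zone n ∈ {0,1,2,3}, so .toNat is exact here)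
def is_equal_zones_alt (numbers : List Int) : Bool :=
  let mask := numbers.foldl (fun m n => m ||| (1 <<< (obtain_zone n).toNat)) 0
  mask == 1 || mask == 2 || mask == 4 || mask == 8

-- ===== PRECONDITION & SPEC =====
def Spec_is_equal_zones (numbers : List Int) (out : Bool) : Prop := out = is_equal_zones_alt numbers
instance (numbers : List Int) (out : Bool) : Decidable (Spec_is_equal_zones numbers out) := by unfold Spec_is_equal_zones; infer_instance

-- ===== CLAIM (what is proved, stated in full; the proofs are below) =====
def Claim_equal_is_equal_zones : Prop := ∀ (numbers : List Int), Dom_is_equal_zones numbers → Spec_is_equal_zones numbers (is_equal_zones numbers)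

-- ===== LEMMAS AND PROOFS =====

theorem zone_cases (n : Int) :
    obtain_zone n = 0 ∨ obtain_zone n = 1 ∨ obtain_zone n = 2 ∨ obtain_zone n = 3 := by
  unfold obtain_zone; split_ifs <;> simp

-- the fold's step function
theorem foldl_or_shift (l : List Int) (m : Nat) :
    l.foldl (fun m n => m ||| (1 <<< (obtain_zone n).toNat)) m
      = m ||| l.foldl (fun m n => m ||| (1 <<< (obtain_zone n).toNat)) 0 := by
  induction l generalizing m with
  | nil => simp
  | cons a l ih =>
    simp only [List.foldl_cons]
    rw [ih (m ||| _), ih (0 ||| _), Nat.zero_or, Nat.or_assoc]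

-- mask value is a power of two at the zone of the head exactly when all later zones agree
theorem mask_bit_mem (l : List Int) (x : Int) (hx : x ∈ l) :
    ((l.foldl (fun m n => m ||| (1 <<< (obtain_zone n).toNat)) 0).testBit
      (obtain_zone x).toNat) = true := by
  induction l with
  | nil => cases hx
  | cons a l ih =>
    simp only [List.foldl_cons, Nat.zero_or]
    rw [foldl_or_shift, Nat.testBit_or]
    rcases List.mem_cons.mp hx with rfl | hx'
    · simp [Nat.testBit_shiftLeft]
    · rw [ih hx']; simp

theorem mask_all_same (l : List Int) (z : Int)
    (h : ∀ x ∈ l, obtain_zone x = z) :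
    l.foldl (fun m n => m ||| (1 <<< (obtain_zone n).toNat)) (1 <<< z.toNat)
      = 1 <<< z.toNat := by
  induction l with
  | nil => rfl
  | cons a l ih =>
    simp only [List.foldl_cons]
    rw [h a List.mem_cons_self, Nat.or_self]
    exact ih (fun x hx => h x (List.mem_cons_of_mem _ hx))

-- a mask in {1,2,4,8} has a single set bit
theorem single_bit {m : Nat} (hm : (m == 1 || m == 2 || m == 4 || m == 8) = true)
    {i j : Nat} (hi : m.testBit i = true) (hj : m.testBit j = true) : i = j := by
  simp only [Bool.or_eq_true, beq_iff_eq] at hm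
  have hpow : ∃ k, m = 2 ^ k := by
    rcases hm with ((rfl | rfl) | rfl) | rfl
    exacts [⟨0, rfl⟩, ⟨1, rfl⟩, ⟨2, rfl⟩, ⟨3, rfl⟩]
  obtain ⟨k, rfl⟩ := hpow
  rw [Nat.testBit_two_pow] at hi hj
  simp at hi hj
  omega

theorem toNat_inj_zone (a b : Int) (h : (obtain_zone a).toNat = (obtain_zone b).toNat) :
    obtain_zone a = obtain_zone b := by
  rcases zone_cases a with ha | ha | ha | ha <;>
  rcases zone_cases b with hb | hb | hb | hb <;>
  simp [ha, hb] at h ⊢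

-- ===== VERDICT (by name: the statement is the Claim_ definition above) =====
theorem is_equal_zones_spec : Claim_equal_is_equal_zones := by
  intro numbers _
  unfold Spec_is_equal_zones is_equal_zones is_equal_zones_alt
  match numbers with
  | [] => rfl
  | first :: rest =>
    simp only [List.foldl_cons, Nat.zero_or]
    by_cases hall : ∀ x ∈ rest, obtain_zone x = obtain_zone first
    · have hA : rest.all (fun number => obtain_zone number == obtain_zone first) = true := by
        simp only [List.all_eq_true, beq_iff_eq]; exact hall
      rw [hA, mask_all_same rest (obtain_zone first) hall]
      rcases zone_cases first with h | h | h | h <;> rw [h] <;> decide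
    · push Not at hall
      obtain ⟨x, hx, hne⟩ := hall
      have hA : rest.all (fun number => obtain_zone number == obtain_zone first) = false := by
        simp only [List.all_eq_false]
        exact ⟨x, hx, by simp [hne]⟩
      rw [hA]
      set M := rest.foldl (fun m n => m ||| (1 <<< (obtain_zone n).toNat))
          (1 <<< (obtain_zone first).toNat) with hM
      have hMfold : M = (1 <<< (obtain_zone first).toNat) |||
          rest.foldl (fun m n => m ||| (1 <<< (obtain_zone n).toNat)) 0 := by
        rw [hM, foldl_or_shift]
      have hbit1 : M.testBit (obtain_zone first).toNat = true := by
        rw [hMfold, Nat.testBit_or]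
        simp [Nat.testBit_shiftLeft]
      have hbit2 : M.testBit (obtain_zone x).toNat = true := by
        rw [hMfold, Nat.testBit_or, mask_bit_mem rest x hx]; simp
      cases hmask : (M == 1 || M == 2 || M == 4 || M == 8) with
      | false => rfl
      | true => exact absurd (toNat_inj_zone x first (single_bit hmask hbit2 hbit1)) hne
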